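-- pv_equiv track=rewrite | github.com/Sokolovskaia/ShopRevenue | app/shops.py | the_best_shop_on_daily_revenue_from_week
-- ===== SOURCE A (Python) =====
-- def the_best_shop_on_daily_revenue_from_week(weekly_revenue):  # 3
--     max_revenue_all = []
--     for shop_revenue in weekly_revenue:
--         max_revenue_all.append(max(shop_revenue))
--     best_shops = []
--     for shop_index, max_revenue in enumerate(max_revenue_all):
--         if max_revenue == max(max_revenue_all):
--             best_shops.append(shop_index)
--     return best_shops
-- ===== SOURCE B (Python) =====
-- def the_best_shop_on_daily_revenue_from_week(weekly_revenue):
--     best = None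
--     best_shops = []
--     for shop_index, shop_revenue in enumerate(weekly_revenue):
--         m = max(shop_revenue)
--         if best is None or m > best:
--             best = m
--             best_shops = [shop_index]
--         elif m == best:
--             best_shops.append(shop_index)
--     return best_shops
-- ===== Notes on version B (the rewrite author's own statement) =====
-- stated objective: simpler
-- what changed: Single left-to-right pass maintaining the running best peak and the list of indices achieving it, instead of building a table of per-shop maxima and then rescanning it (recomputing the global max inside the loop) to collect indices.
import Mathlib
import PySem

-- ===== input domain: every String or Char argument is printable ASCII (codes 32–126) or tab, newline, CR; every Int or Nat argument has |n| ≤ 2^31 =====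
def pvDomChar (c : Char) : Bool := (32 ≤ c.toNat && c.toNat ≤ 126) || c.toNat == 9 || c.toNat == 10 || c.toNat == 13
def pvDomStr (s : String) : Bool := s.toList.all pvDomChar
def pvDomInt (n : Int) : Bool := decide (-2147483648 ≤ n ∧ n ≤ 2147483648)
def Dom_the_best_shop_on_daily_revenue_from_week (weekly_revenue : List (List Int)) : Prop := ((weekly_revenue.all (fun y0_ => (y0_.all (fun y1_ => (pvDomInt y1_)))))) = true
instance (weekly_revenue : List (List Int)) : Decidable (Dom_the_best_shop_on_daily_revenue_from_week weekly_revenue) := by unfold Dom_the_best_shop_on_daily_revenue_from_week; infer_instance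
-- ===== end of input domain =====

-- B replaces A's per-shop max table + second index-collecting scan (global max recomputed each
-- iteration) by a single pass keeping the running best peak and its index list.


-- ===== PORT A =====
def the_best_shop_on_daily_revenue_from_week (weekly_revenue : List (List Int)) : List Int :=
  let max_revenue_all := weekly_revenue.foldl
    (fun acc shop_revenue => acc ++ [(PySem.List.max? shop_revenue (fun y => y)).getD 0]) []
  (PySem.List.enumerate max_revenue_all).foldl
    (fun best_shops p =>
      if p.2 = (PySem.List.max? max_revenue_all (fun y => y)).getD 0 then best_shops ++ [p.1]
      else best_shops) []

-- ===== PORT B =====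
def pvAltStep (st : Option Int × List Int) (p : Int × List Int) : Option Int × List Int :=
  let m := (PySem.List.max? p.2 (fun y => y)).getD 0
  match st.1 with
  | none => (some m, [p.1])
  | some b =>
    if m > b then (some m, [p.1])
    else if m = b then (st.1, st.2 ++ [p.1])
    else st

def the_best_shop_on_daily_revenue_from_week_alt (weekly_revenue : List (List Int)) : List Int :=
  ((PySem.List.enumerate weekly_revenue).foldl pvAltStep (none, [])).2

-- ===== PRECONDITION & SPEC =====
-- Python A raises ValueError (max of empty sequence) whenever some inner list is empty.
def Pre_the_best_shop_on_daily_revenue_from_week (weekly_revenue : List (List Int)) : Prop :=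
  ∀ s ∈ weekly_revenue, s ≠ []
instance (weekly_revenue : List (List Int)) : Decidable (Pre_the_best_shop_on_daily_revenue_from_week weekly_revenue) := by unfold Pre_the_best_shop_on_daily_revenue_from_week; infer_instance
def pvWitness_the_best_shop_on_daily_revenue_from_week : List (List Int) := [[1, 5], [3], [5, 0]]

def Spec_the_best_shop_on_daily_revenue_from_week (weekly_revenue : List (List Int)) (out : List Int) : Prop := out = the_best_shop_on_daily_revenue_from_week_alt weekly_revenue
instance (weekly_revenue : List (List Int)) (out : List Int) : Decidable (Spec_the_best_shop_on_daily_revenue_from_week weekly_revenue out) := by unfold Spec_the_best_shop_on_daily_revenue_from_week; infer_instance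

-- ===== CLAIM (what is proved, stated in full; the proofs are below) =====
def Claim_equal_the_best_shop_on_daily_revenue_from_week : Prop := ∀ (weekly_revenue : List (List Int)), Dom_the_best_shop_on_daily_revenue_from_week weekly_revenue → Pre_the_best_shop_on_daily_revenue_from_week weekly_revenue → Spec_the_best_shop_on_daily_revenue_from_week weekly_revenue (the_best_shop_on_daily_revenue_from_week weekly_revenue)

-- ===== LEMMAS AND PROOFS =====

-- f s = the value A stores for shop s (max of the shop, 0 only on the empty shop, outside Pre_)
def pvF (s : List Int) : Int := (PySem.List.max? s (fun y => y)).getD 0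

lemma pvA_table (wr : List (List Int)) (acc : List Int) :
    wr.foldl (fun acc shop => acc ++ [(PySem.List.max? shop (fun y => y)).getD 0]) acc
      = acc ++ wr.map pvF := by
  induction wr generalizing acc with
  | nil => simp
  | cons h t ih => simp [ih, pvF]

lemma pvA_filter (xs : List (List Int)) (M : Int) (s : Int) (acc : List Int) :
    (PySem.List.enumerate (xs.map pvF) s).foldl
        (fun best p => if p.2 = M then best ++ [p.1] else best) acc
      = acc ++ ((PySem.List.enumerate xs s).filter (fun q => pvF q.2 == M)).map (·.1) := by
  induction xs generalizing s acc with
  | nil => simp [PySem.List.enumerate_nil]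
  | cons h t ih =>
    simp only [List.map_cons, PySem.List.enumerate_cons, List.foldl_cons, List.filter_cons]
    by_cases hM : pvF h = M
    · simp [hM, ih]
    · simp [hM, ih]

lemma pvMax?_snoc (xs : List Int) (b x : Int) (h : PySem.List.max? xs (fun y => y) = some b) :
    PySem.List.max? (xs ++ [x]) (fun y => y) = some (max b x) := by
  cases xs with
  | nil => simp [PySem.List.max?] at h
  | cons y t =>
    rw [List.cons_append, PySem.List.max?_id_cons, List.foldl_append]
    rw [PySem.List.max?_id_cons] at h
    simp at h
    simp [h]

-- B's fold computes (global max of the per-shop maxima, A's index list)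
lemma pvB_inv (ws : List (List Int)) (s : Int) :
    (PySem.List.enumerate ws s).foldl pvAltStep (none, [])
      = (PySem.List.max? (ws.map pvF) (fun y => y),
         ((PySem.List.enumerate ws s).filter
            (fun q => PySem.List.max? (ws.map pvF) (fun y => y) == some (pvF q.2))).map (·.1)) := by
  induction ws using List.reverseRecOn generalizing s with
  | nil => simp [PySem.List.enumerate_nil, PySem.List.max?]
  | append_singleton ws w ih =>
    rw [PySem.List.enumerate_append, List.foldl_append, ih]
    have hone : PySem.List.enumerate [w] (s + (ws.length : Int)) = [(s + (ws.length : Int), w)] := by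
      simp [PySem.List.enumerate_cons, PySem.List.enumerate_nil]
    cases hmax : PySem.List.max? (ws.map pvF) (fun y => y) with
    | none =>
      have hnil : ws = [] := by
        have := (PySem.List.max?_eq_none_iff (xs := ws.map pvF) (key := fun y => y)).mp hmax
        simpa using this
      subst hnil
      simp [PySem.List.enumerate_nil, pvAltStep, pvF, PySem.List.max?]
    | some b =>
      have hle : ∀ q ∈ PySem.List.enumerate ws s, pvF q.2 ≤ b := by
        intro q hq
        obtain ⟨k, hk, rfl⟩ := (PySem.List.mem_enumerate_iff _ _ _).mp hq
        have : pvF ws[k] ∈ ws.map pvF := by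
          exact List.mem_map.mpr ⟨ws[k], List.getElem_mem hk, rfl⟩
        exact PySem.List.max?_isMax hmax _ this
      have hsnoc := pvMax?_snoc (ws.map pvF) b (pvF w) hmax
      simp only [List.map_append, List.map_cons, List.map_nil]
      rw [hsnoc, hone]
      simp only [List.foldl_cons, List.foldl_nil, List.filter_append]
      have hf : (PySem.List.max? w fun y => y).getD 0 = pvF w := rfl
      by_cases hgt : b < pvF w
      · have hmx : max b (pvF w) = pvF w := by omega
        have hfilt : ((PySem.List.enumerate ws s).filter (fun q => pvF w == pvF q.2)) = [] := by
          apply List.filter_eq_nil_iff.mpr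
          intro q hq
          have := hle q hq
          simp only [beq_iff_eq]
          omega
        simp [pvAltStep, hf, hmx, hgt, hfilt]
      · by_cases heq : pvF w = b
        · have hmx : max b (pvF w) = b := by omega
          simp [pvAltStep, hf, heq]
        · have hmx : max b (pvF w) = b := by omega
          simp [pvAltStep, hf, hmx, hgt, heq, Ne.symm heq]

-- ===== VERDICT (by name: the statement is the Claim_ definition above) =====
theorem the_best_shop_on_daily_revenue_from_week_spec : Claim_equal_the_best_shop_on_daily_revenue_from_week := by
  intro wr _ _
  unfold Spec_the_best_shop_on_daily_revenue_from_week
  unfold the_best_shop_on_daily_revenue_from_week the_best_shop_on_daily_revenue_from_week_alt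
  rw [pvB_inv wr 0]
  simp only [pvA_table wr [], List.nil_append]
  rw [pvA_filter wr ((PySem.List.max? (wr.map pvF) (fun y => y)).getD 0) 0 []]
  cases hmax : PySem.List.max? (wr.map pvF) (fun y => y) with
  | none =>
    have hnil : wr = [] := by
      have := (PySem.List.max?_eq_none_iff (xs := wr.map pvF) (key := fun y => y)).mp hmax
      simpa using this
    subst hnil
    simp [PySem.List.enumerate_nil]
  | some M =>
    simp only [Option.getD_some, List.nil_append]
    congr 1
    apply List.filter_congr
    intro q _
    simp [eq_comm]
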